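-- pv_equiv track=rewrite | github.com/alclass/cxlots | fs/mathfs/metrics/museum/idxshapearea_circle_metric.py | get_col_n_row_1indices_from_cardarray
-- ===== SOURCE A (Python) =====
-- import math
--
-- def extract_as_tupl_col1idx_n_row1idx_from_carddozen(n, low_high_limit=(1, 60)):
--   """
--   Example:
--     dozen = 15 => row_idx = 2, col_idx = 5
--     dozen = 10 => row_idx = 1, col_idx = 0
--     dozen = 1 => row_idx = 1, col_idx = 1
--     dozen = 11 => row_idx = 2, col_idx = 1
--     dozen = 60 => row_idx = 6, col_idx = 0
--   """
--   try:
--     n = int(n)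
--   except (TypeError, ValueError):
--     return None, None
--   if n < low_high_limit[0] or n > low_high_limit[1]:
--     return None, None
--   col1idx = ((n-1) % 10) + 1  # it's the same as the unit-digit
--   row1idx = math.ceil(n/10)  # notice that row1idx(10)=1 & row1idx(11)=2
--   return col1idx, row1idx
--
-- def get_col_n_row_1indices_from_cardarray(dozenarray):
--   row_1indices, column_1indices = [], []
--   for d in dozenarray:
--     col1idx, row1idx = extract_as_tupl_col1idx_n_row1idx_from_carddozen(d)
--     if col1idx is None or row1idx is None:
--       return [], []
--     column_1indices.append(col1idx)
--     row_1indices.append(row1idx)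
--   return column_1indices, row_1indices
-- ===== SOURCE B (Python) =====
-- # Precomputed grid table: enumerate the 6x10 grid cells and record which card
-- # dozen lives in each; lookup then replaces all per-element arithmetic/bounds checks.
-- _TABLE = {}
-- for _row in range(1, 7):
--   for _col in range(1, 11):
--     _TABLE[(_row - 1) * 10 + _col] = (_col, _row)
--
--
-- def get_col_n_row_1indices_from_cardarray(dozenarray):
--   try:
--     pairs = [_TABLE[d] for d in dozenarray]
--   except KeyError:
--     return [], []
--   return [p[0] for p in pairs], [p[1] for p in pairs]
-- ===== Notes on version B (the rewrite author's own statement) =====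
-- stated objective: alternative
-- what changed: Replaced A's per-element arithmetic (unit-digit modulo, ceil division) with a precomputed 60-entry grid table built once by enumerating (row,col) cells in the inverse direction, and replaced A's interleaved early-return append loop with a single table-lookup comprehension whose KeyError aborts to ([],[]), followed by two projection passes.
import Mathlib
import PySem

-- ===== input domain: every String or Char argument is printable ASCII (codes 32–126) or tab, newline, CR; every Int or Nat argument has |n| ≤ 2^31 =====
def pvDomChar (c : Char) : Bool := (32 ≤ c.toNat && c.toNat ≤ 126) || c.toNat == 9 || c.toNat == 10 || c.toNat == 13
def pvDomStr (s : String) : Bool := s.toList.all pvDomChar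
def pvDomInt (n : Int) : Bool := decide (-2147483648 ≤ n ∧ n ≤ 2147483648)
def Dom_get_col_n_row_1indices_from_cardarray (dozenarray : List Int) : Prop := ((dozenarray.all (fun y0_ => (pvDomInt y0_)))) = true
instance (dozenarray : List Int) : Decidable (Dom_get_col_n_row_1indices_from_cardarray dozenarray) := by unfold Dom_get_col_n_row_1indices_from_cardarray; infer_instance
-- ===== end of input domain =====

-- B replaces A's per-element arithmetic + early-return append loop by a 60-entry grid table
-- built once (inverse enumeration of (row,col) cells) and a lookup pass whose KeyError aborts
-- to ([],[]) plus two projection passes (alternative decomposition, same cost).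

-- ===== PORT A =====
-- extract_as_tupl_col1idx_n_row1idx_from_carddozen (int(n) is the identity on an Int argument);
-- math.ceil(n/10) is ported as -((-n) // 10), exact on the ints that reach it (1 ≤ n ≤ 60)
def pvExtractA (n : Int) : Option Int × Option Int :=
  if n < 1 ∨ n > 60 then (none, none)
  else (some (PySem.Int.mod (n - 1) 10 + 1), some (-(PySem.Int.floordiv (-n) 10)))

def pvLoopA (ds : List Int) (row_1indices column_1indices : List Int) : List Int × List Int :=
  match ds with
  | [] => (column_1indices, row_1indices)
  | d :: t =>
    match pvExtractA d with
    | (some c, some r) => pvLoopA t (row_1indices ++ [r]) (column_1indices ++ [c])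
    | _ => ([], [])

def get_col_n_row_1indices_from_cardarray (dozenarray : List Int) : List Int × List Int :=
  pvLoopA dozenarray [] []

-- ===== PORT B =====
-- the module-level table, built by the two nested range loops of Source B
def pvTableB : PySem.Dict Int (Int × Int) :=
  (PySem.List.pyRange 1 7 1).foldl (fun d row =>
    (PySem.List.pyRange 1 11 1).foldl (fun d col =>
      d.insert ((row - 1) * 10 + col) (col, row)) d) PySem.Dict.empty

-- the comprehension [_TABLE[d] for d in dozenarray] inside try/except KeyError:
-- Option-valued traversal, none exactly when some lookup raises KeyError
def pvLookupAllB (ds : List Int) : Option (List (Int × Int)) :=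
  match ds with
  | [] => some []
  | d :: t =>
    match pvTableB.get? d with
    | none => none
    | some p =>
      match pvLookupAllB t with
      | none => none
      | some ps => some (p :: ps)

def get_col_n_row_1indices_from_cardarray_alt (dozenarray : List Int) : List Int × List Int :=
  match pvLookupAllB dozenarray with
  | none => ([], [])
  | some pairs => (pairs.map (fun p => p.1), pairs.map (fun p => p.2))

-- ===== PRECONDITION & SPEC =====
def Spec_get_col_n_row_1indices_from_cardarray (dozenarray : List Int) (out : List Int × List Int) : Prop := out = get_col_n_row_1indices_from_cardarray_alt dozenarray
instance (dozenarray : List Int) (out : List Int × List Int) : Decidable (Spec_get_col_n_row_1indices_from_cardarray dozenarray out) := by unfold Spec_get_col_n_row_1indices_from_cardarray; infer_instance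

-- ===== CLAIM (what is proved, stated in full; the proofs are below) =====
def Claim_equal_get_col_n_row_1indices_from_cardarray : Prop := ∀ (dozenarray : List Int), Dom_get_col_n_row_1indices_from_cardarray dozenarray → Spec_get_col_n_row_1indices_from_cardarray dozenarray (get_col_n_row_1indices_from_cardarray dozenarray)

-- ===== LEMMAS AND PROOFS =====

-- the common per-element value both programs produce for an in-range dozen
def pvPairF (n : Int) : Int × Int :=
  (PySem.Int.mod (n - 1) 10 + 1, PySem.Int.floordiv (n + 9) 10)

-- B's table, characterised: lookup succeeds exactly on 1..60 and returns pvPairF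
set_option maxRecDepth 40000 in
lemma pv_table_get (n : Int) :
    pvTableB.get? n = if 1 ≤ n ∧ n ≤ 60 then some (pvPairF n) else none := by
  by_cases h : 1 ≤ n ∧ n ≤ 60
  · obtain ⟨h1, h2⟩ := h
    rw [if_pos ⟨h1, h2⟩]
    interval_cases n <;> decide
  · rw [if_neg h]
    have hkeys : pvTableB.keys = PySem.List.pyRange 1 61 1 := by decide
    have hnmem : n ∉ pvTableB.keys := by
      rw [hkeys, PySem.List.mem_pyRange_one]; omega
    have hc : pvTableB.contains n = false := by
      by_contra hb
      exact hnmem ((PySem.Dict.contains_iff_mem_keys _ _).mp (by revert hb; cases pvTableB.contains n <;> simp))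
    exact (PySem.Dict.get?_eq_none_iff_contains _ _).mpr hc

-- A's per-element extraction, phrased through pvPairF
lemma pv_extract_eq (n : Int) :
    pvExtractA n = if 1 ≤ n ∧ n ≤ 60 then (some (pvPairF n).1, some (pvPairF n).2)
                   else (none, none) := by
  unfold pvExtractA pvPairF
  by_cases h : 1 ≤ n ∧ n ≤ 60
  · simp only [if_pos h, if_neg (show ¬(n < 1 ∨ n > 60) by omega)]
    have hq := (PySem.Int.floordiv_eq_iff_of_pos (show (0:Int) < 10 by omega)).mp
      (rfl : PySem.Int.floordiv (n + 9) 10 = PySem.Int.floordiv (n + 9) 10)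
    have hceil : -(PySem.Int.floordiv (-n) 10) = PySem.Int.floordiv (n + 9) 10 :=
      (PySem.Int.neg_floordiv_neg_eq_iff_of_pos (show (0:Int) < 10 by omega)).mpr (by omega)
    rw [hceil]
  · simp [h, show n < 1 ∨ n > 60 by omega]

-- A's loop, characterised against the per-element map
lemma pv_loopA_spec (ds rows cols : List Int) :
    pvLoopA ds rows cols =
      if ds.all (fun d => decide (1 ≤ d ∧ d ≤ 60)) then
        (cols ++ ds.map (fun d => (pvPairF d).1), rows ++ ds.map (fun d => (pvPairF d).2))
      else ([], []) := by
  induction ds generalizing rows cols with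
  | nil => simp [pvLoopA]
  | cons d t ih =>
    by_cases h : 1 ≤ d ∧ d ≤ 60
    · have he := pv_extract_eq d
      rw [if_pos h] at he
      simp only [pvLoopA, he, ih, List.all_cons, List.map_cons]
      simp [h]
    · have he := pv_extract_eq d
      rw [if_neg h] at he
      simp [pvLoopA, he, h]

-- B's lookup pass, characterised the same way
set_option maxRecDepth 100000 in
lemma pvLookupAllB_nil : pvLookupAllB [] = some [] := rfl

set_option maxRecDepth 100000 in
lemma pvLookupAllB_cons (d : Int) (t : List Int) :
    pvLookupAllB (d :: t) =
      match pvTableB.get? d with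
      | none => none
      | some p =>
        match pvLookupAllB t with
        | none => none
        | some ps => some (p :: ps) := rfl

lemma pv_lookup_spec (ds : List Int) :
    pvLookupAllB ds =
      if ds.all (fun d => decide (1 ≤ d ∧ d ≤ 60)) then some (ds.map pvPairF)
      else none := by
  induction ds with
  | nil => rw [pvLookupAllB_nil]; simp
  | cons d t ih =>
    rw [pvLookupAllB_cons, pv_table_get, ih]
    by_cases h : 1 ≤ d ∧ d ≤ 60
    · rw [if_pos h]
      by_cases ht : (t.all fun d => decide (1 ≤ d ∧ d ≤ 60)) = true
      · rw [if_pos ht]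
        simp only [List.all_eq_true, decide_eq_true_eq] at ht
        simp [List.all_cons, h]
        exact ht
      · rw [if_neg ht]
        simp only [List.all_eq_true, decide_eq_true_eq] at ht
        push Not at ht
        simp [List.all_cons, h]
        exact ht
    · rw [if_neg h]; simp [List.all_cons, h]

-- ===== VERDICT (by name: the statement is the Claim_ definition above) =====
theorem get_col_n_row_1indices_from_cardarray_spec : Claim_equal_get_col_n_row_1indices_from_cardarray := by
  intro ds _
  unfold Spec_get_col_n_row_1indices_from_cardarray get_col_n_row_1indices_from_cardarray
    get_col_n_row_1indices_from_cardarray_alt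
  rw [pv_loopA_spec, pv_lookup_spec]
  split <;> simp
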